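-- pv_equiv track=rewrite | github.com/juritox/advent-of-code | 2024/Day04/day_04_part_1_solution.py | get_all_secondary_diagonal_lines
-- ===== SOURCE A (Python) =====
-- def get_all_horizontal_lines(puzzle: str) -> list[str]:
--     """
--     Split the puzzle input into horizontal lines.
--
--     Args:
--         puzzle (str): The complete puzzle input as a string.
--
--     Returns:
--         list[str]: A list of strings, each representing a horizontal line in the puzzle.
--     """
--     return puzzle.splitlines()
--
-- def get_all_secondary_diagonal_lines(puzzle: str) -> list[str]:
--     """
--     Extract all secondary (top-right to bottom-left) diagonal lines from the puzzle input.
--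
--     Args:
--         puzzle (str): The complete puzzle input as a string.
--
--     Returns:
--         list[str]: A list of strings, each representing a secondary diagonal line in the puzzle.
--     """
--     rows = get_all_horizontal_lines(puzzle)
--
--     num_rows = len(rows)
--     num_cols = len(rows[0])
--     secondary_diagonals = []
--
--     # Traverse diagonals starting from the first column of each row
--     for start_row in range(num_rows):
--         diagonal = []
--         row, col = start_row, num_cols - 1
--         while row < num_rows and col >= 0:
--             diagonal.append(rows[row][col])
--             row += 1
--             col -= 1
--         secondary_diagonals.append("".join(diagonal))
--
--     # Traverse diagonals starting from the last column of each row (except the first row)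
--     for start_col in range(num_cols - 2, -1, -1):
--         diagonal = []
--         row, col = 0, start_col
--         while row < num_rows and col >= 0:
--             diagonal.append(rows[row][col])
--             row += 1
--             col -= 1
--         secondary_diagonals.append("".join(diagonal))
--
--     return secondary_diagonals
-- ===== SOURCE B (Python) =====
-- def get_all_secondary_diagonal_lines(puzzle: str) -> list[str]:
--     rows = puzzle.splitlines()
--     num_rows = len(rows)
--     num_cols = len(rows[0])
--     # one pass: bucket every cell by its anti-diagonal key r + c (ascending r keeps order)
--     cells = [(r + c, rows[r][c]) for r in range(num_rows) for c in range(num_cols)]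
--     buckets = {}
--     for key, ch in cells:
--         buckets.setdefault(key, []).append(ch)
--     # emit in A's order: sums num_cols-1 .. num_rows+num_cols-2, then num_cols-2 down to 0
--     order = list(range(num_cols - 1, num_rows + num_cols - 1)) + list(range(num_cols - 2, -1, -1))
--     return ["".join(buckets.get(s, [])) for s in order]
-- ===== Notes on version B (the rewrite author's own statement) =====
-- stated objective: alternative
-- what changed: Replaces A's two explicit diagonal-walking while-loops by a single pass that buckets every cell under its anti-diagonal key r+c in a dict, then emits the buckets in A's exact order (sums num_cols-1..num_rows+num_cols-2, then num_cols-2 down to 0).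
import Mathlib
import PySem

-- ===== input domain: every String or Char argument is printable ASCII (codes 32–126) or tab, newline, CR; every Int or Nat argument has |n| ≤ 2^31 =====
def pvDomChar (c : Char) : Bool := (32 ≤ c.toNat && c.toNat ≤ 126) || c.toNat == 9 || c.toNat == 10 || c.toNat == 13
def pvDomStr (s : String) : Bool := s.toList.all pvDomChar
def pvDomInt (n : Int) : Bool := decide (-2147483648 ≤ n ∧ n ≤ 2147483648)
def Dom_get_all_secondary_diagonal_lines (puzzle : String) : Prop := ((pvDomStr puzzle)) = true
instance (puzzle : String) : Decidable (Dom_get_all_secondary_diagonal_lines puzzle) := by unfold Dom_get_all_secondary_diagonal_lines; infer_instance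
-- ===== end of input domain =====

-- B replaces A's two explicit diagonal-walking while-loops by one bucketing pass keyed by r+c
-- plus an emission in A's order (objective: alternative decomposition, same cost).

-- ===== PORT A =====
-- A's while loop: walk one secondary diagonal from (row, col), collecting characters.
-- Out-of-range indexing (IndexError in Python) is excluded by Pre_; the port reads a default there.
def pvWalkA (rows : List String) (numRows : Int) (row col : Int) (acc : List Char) : List Char :=
  if _h : row < numRows ∧ 0 ≤ col then
    pvWalkA rows numRows (row + 1) (col - 1)
      ((((PySem.List.pyGet? rows row).bind (fun t => PySem.Str.pyGet? t col)).getD ' ') :: acc)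
  else acc.reverse
termination_by (numRows - row).toNat
decreasing_by omega

def get_all_secondary_diagonal_lines (puzzle : String) : List String :=
  let rows := PySem.Str.splitlines puzzle
  let numRows : Int := PySem.List.len rows
  -- rows[0]: IndexError on an empty puzzle, excluded by Pre_
  let numCols : Int := PySem.Str.len ((PySem.List.pyGet? rows 0).getD "")
  (PySem.List.pyRange 0 numRows 1).map
      (fun startRow => String.mk (pvWalkA rows numRows startRow (numCols - 1) []))
    ++ (PySem.List.pyRange (numCols - 2) (-1) (-1)).map
      (fun startCol => String.mk (pvWalkA rows numRows 0 startCol []))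

-- ===== PORT B =====
-- rows[r][c] (IndexError excluded by Pre_; the port reads a default there)
def pvCellB (rows : List String) (r c : Int) : Char :=
  ((PySem.List.pyGet? rows r).bind (fun t => PySem.Str.pyGet? t c)).getD ' '

def get_all_secondary_diagonal_lines_alt (puzzle : String) : List String :=
  let rows := PySem.Str.splitlines puzzle
  let numRows : Int := PySem.List.len rows
  let numCols : Int := PySem.Str.len ((PySem.List.pyGet? rows 0).getD "")
  let cells : List (Int × Char) :=
    (PySem.List.pyRange 0 numRows 1).flatMap (fun r =>
      (PySem.List.pyRange 0 numCols 1).map (fun c => (r + c, pvCellB rows r c)))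
  let buckets : PySem.Dict Int (List Char) :=
    cells.foldl (fun d p => d.modify p.1 [] (· ++ [p.2])) PySem.Dict.empty
  let order := PySem.List.pyRange (numCols - 1) (numRows + numCols - 1) 1
    ++ PySem.List.pyRange (numCols - 2) (-1) (-1)
  order.map (fun s => String.mk (buckets.getD s []))

-- ===== PRECONDITION & SPEC =====
-- Pre_ excludes exactly the inputs on which Python A raises IndexError: an empty puzzle
-- (rows[0] of no rows) and a grid in which some row is shorter than the first row
-- (every such cell is eventually indexed by one of A's diagonal walks).
def Pre_get_all_secondary_diagonal_lines (puzzle : String) : Prop :=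
  PySem.Str.splitlines puzzle ≠ [] ∧
  ∀ s ∈ PySem.Str.splitlines puzzle,
    ((PySem.Str.splitlines puzzle).headD "").toList.length ≤ s.toList.length
instance (puzzle : String) : Decidable (Pre_get_all_secondary_diagonal_lines puzzle) := by
  unfold Pre_get_all_secondary_diagonal_lines; infer_instance

def pvWitness_get_all_secondary_diagonal_lines : String := "XMAS\nAMXS\nSSAA\nMMXX"

def Spec_get_all_secondary_diagonal_lines (puzzle : String) (out : List String) : Prop := out = get_all_secondary_diagonal_lines_alt puzzle
instance (puzzle : String) (out : List String) : Decidable (Spec_get_all_secondary_diagonal_lines puzzle out) := by unfold Spec_get_all_secondary_diagonal_lines; infer_instance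

-- ===== CLAIM (what is proved, stated in full; the proofs are below) =====
def Claim_equal_get_all_secondary_diagonal_lines : Prop := ∀ (puzzle : String), Dom_get_all_secondary_diagonal_lines puzzle → Pre_get_all_secondary_diagonal_lines puzzle → Spec_get_all_secondary_diagonal_lines puzzle (get_all_secondary_diagonal_lines puzzle)

-- ===== LEMMAS AND PROOFS =====

-- A's walk from (row, col) equals the segment of the anti-diagonal s = row + col,
-- read off row by row over the whole row range (rows before `row` contribute nothing here).
lemma pvWalkA_eq (rows : List String) (C : Int) :
    ∀ (n : Nat) (row col s : Int) (acc : List Char), col < C → s = row + col →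
      ((rows.length : Int) - row).toNat = n →
      pvWalkA rows (rows.length : Int) row col acc
        = acc.reverse ++ (PySem.List.pyRange row (rows.length : Int) 1).flatMap
            (fun r => if 0 ≤ s - r ∧ s - r < C then [pvCellB rows r (s - r)] else []) := by
  intro n
  induction n with
  | zero =>
    intro row col s acc hcol hs hn
    have hge : (rows.length : Int) ≤ row := by omega
    rw [pvWalkA, dif_neg (by omega), PySem.List.pyRange_one_eq_nil hge]
    simp
  | succ n ih =>
    intro row col s acc hcol hs hn
    have hlt : row < (rows.length : Int) := by omega
    by_cases hc : 0 ≤ col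
    · rw [pvWalkA, dif_pos ⟨hlt, hc⟩]
      rw [ih (row + 1) (col - 1) s _ (by omega) (by omega) (by omega)]
      rw [PySem.List.pyRange_one_cons hlt, List.flatMap_cons]
      have hif : (if 0 ≤ s - row ∧ s - row < C then [pvCellB rows row (s - row)] else [])
          = [pvCellB rows row col] := by
        rw [if_pos (by omega)]
        have : s - row = col := by omega
        rw [this]
      rw [hif]
      simp [pvCellB]
    · rw [pvWalkA, dif_neg (by omega)]
      have : (PySem.List.pyRange row (rows.length : Int) 1).flatMap
          (fun r => if 0 ≤ s - r ∧ s - r < C then [pvCellB rows r (s - r)] else []) = [] := by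
        apply List.flatMap_eq_nil_iff.mpr
        intro r hr
        have := (PySem.List.mem_pyRange_one).1 hr
        rw [if_neg (by omega)]
      rw [this, List.append_nil]

lemma pvFilter_pyRange (b v : Int) :
    ∀ (n : Nat) (a : Int), (b - a).toNat = n →
      (PySem.List.pyRange a b 1).filter (fun c => c == v) = if a ≤ v ∧ v < b then [v] else [] := by
  intro n
  induction n with
  | zero =>
    intro a hn
    rw [PySem.List.pyRange_one_eq_nil (by omega), if_neg (by omega)]
    rfl
  | succ n ih =>
    intro a hn
    have hab : a < b := by omega
    rw [PySem.List.pyRange_one_cons hab, List.filter_cons, ih (a + 1) (by omega)]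
    by_cases hv : a = v
    · subst hv
      rw [if_pos (by simp), if_neg (by omega), if_pos ⟨le_refl a, hab⟩]
    · rw [if_neg (by simp [hv])]
      split_ifs with h1 h2 h2 <;> first | rfl | omega

-- B's bucket for key s, computed: the same anti-diagonal read row by row.
lemma pvBucket_eq (rows : List String) (R C s : Int) :
    (((PySem.List.pyRange 0 R 1).flatMap (fun r =>
          (PySem.List.pyRange 0 C 1).map (fun c => (r + c, pvCellB rows r c)))).foldl
        (fun d p => d.modify p.1 [] (· ++ [p.2])) PySem.Dict.empty).getD s []
      = (PySem.List.pyRange 0 R 1).flatMap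
          (fun r => if 0 ≤ s - r ∧ s - r < C then [pvCellB rows r (s - r)] else []) := by
  rw [PySem.Dict.getD_foldl_modify_append]
  simp only [List.filter_flatMap, List.map_flatMap, List.filter_map, List.map_map,
    PySem.Dict.getD_empty, List.nil_append]
  congr 1
  funext r
  have hcongr : (PySem.List.pyRange 0 C 1).filter
        ((fun p => p.1 == s) ∘ (fun c => (r + c, pvCellB rows r c)))
      = (PySem.List.pyRange 0 C 1).filter (fun c => c == (s - r)) := by
    apply List.filter_congr
    intro c _
    simp only [Function.comp_apply]
    rw [Bool.eq_iff_iff]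
    simp only [beq_iff_eq]
    omega
  rw [hcongr, pvFilter_pyRange C (s - r) (C - 0).toNat 0 rfl]
  split_ifs with h
  · simp [Function.comp]
  · rfl

-- ===== VERDICT (by name: the statement is the Claim_ definition above) =====
theorem get_all_secondary_diagonal_lines_spec : Claim_equal_get_all_secondary_diagonal_lines := by
  intro puzzle _hdom _hpre
  unfold Spec_get_all_secondary_diagonal_lines
  simp only [get_all_secondary_diagonal_lines, get_all_secondary_diagonal_lines_alt,
    PySem.List.len_eq]
  set rows := PySem.Str.splitlines puzzle with hrows
  set C : Int := PySem.Str.len ((PySem.List.pyGet? rows 0).getD "") with hC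
  rw [List.map_append]
  refine congrArg₂ (· ++ · : List String → List String → List String) ?_ ?_
  · -- first loop: start rows 0..R-1 vs sums C-1..R+C-2
    have hshift : PySem.List.pyRange (C - 1) ((rows.length : Int) + C - 1) 1
        = (PySem.List.pyRange 0 (rows.length : Int) 1).map (fun r => C - 1 + r) := by
      rw [PySem.List.pyRange_one (C - 1) ((rows.length : Int) + C - 1),
          PySem.List.pyRange_one 0 (rows.length : Int), List.map_map,
          show ((rows.length : Int) + C - 1 - (C - 1)) = (rows.length : Int) - 0 from by ring]
      apply List.map_congr_left
      intro k _
      simp only [Function.comp_apply]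
      ring
    rw [hshift, List.map_map]
    apply List.map_congr_left
    intro r hr
    have hrR := (PySem.List.mem_pyRange_one).1 hr
    simp only [Function.comp_apply]
    rw [pvWalkA_eq rows C ((rows.length : Int) - r).toNat r (C - 1) (C - 1 + r) []
          (by omega) (by ring) rfl]
    rw [pvBucket_eq rows (rows.length : Int) C (C - 1 + r)]
    rw [List.reverse_nil, List.nil_append]
    rw [PySem.List.pyRange_one_append 0 r (rows.length : Int) (by omega) (by omega),
        List.flatMap_append]
    have hfront : (PySem.List.pyRange 0 r 1).flatMap
        (fun r' => if 0 ≤ C - 1 + r - r' ∧ C - 1 + r - r' < C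
                  then [pvCellB rows r' (C - 1 + r - r')] else []) = [] := by
      apply List.flatMap_eq_nil_iff.mpr
      intro r' hr'
      have := (PySem.List.mem_pyRange_one).1 hr'
      rw [if_neg (by omega)]
    rw [hfront, List.nil_append]
  · -- second loop: start cols C-2..0 vs sums C-2..0
    apply List.map_congr_left
    intro s hs
    have hmem := (PySem.List.mem_pyRange_neg_one).1 hs
    rw [pvWalkA_eq rows C ((rows.length : Int) - 0).toNat 0 s s [] (by omega) (by ring) rfl]
    rw [pvBucket_eq rows (rows.length : Int) C s]
    rw [List.reverse_nil, List.nil_append]
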